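-- pv_equiv track=rewrite | github.com/yswcyswc/15112TermProject | primsMaze.py | printMazePrims
-- ===== SOURCE A (Python) =====
-- def printMazePrims(infoDict, size):
--
--     # Convert the dictionary to a list for output
--     outputList = []
--
--     for row in range(size):
--         currRow = []
--         for col in range(size):
--             currRow.append(False)
--         outputList.append(currRow)
--
--     for row in range(len(outputList)):
--         for col in range(len(outputList)):
--             for (k1, k2) in infoDict:
--                 if (row, col) == (k1, k2) and infoDict[(k1, k2)]:
--                     outputList[row][col] = infoDict[(k1, k2)]
--     return outputList
-- ===== SOURCE B (Python) =====
-- def printMazePrims(infoDict, size):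
--     # Build a False grid once, then set each truthy dict cell in a single pass.
--     grid = [[False] * size for _ in range(size)]
--     for (r, c), v in infoDict.items():
--         if v and 0 <= r < size and 0 <= c < size:
--             grid[r][c] = True
--     return grid
-- ===== Notes on version B (the rewrite author's own statement) =====
-- stated objective: faster
-- what changed: A fills a False grid and then, for every one of the size*size cells, scans the whole dict (with a dict lookup per entry); B builds the False grid once and makes a single pass over the dict, setting each in-range truthy cell directly.
import Mathlib
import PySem

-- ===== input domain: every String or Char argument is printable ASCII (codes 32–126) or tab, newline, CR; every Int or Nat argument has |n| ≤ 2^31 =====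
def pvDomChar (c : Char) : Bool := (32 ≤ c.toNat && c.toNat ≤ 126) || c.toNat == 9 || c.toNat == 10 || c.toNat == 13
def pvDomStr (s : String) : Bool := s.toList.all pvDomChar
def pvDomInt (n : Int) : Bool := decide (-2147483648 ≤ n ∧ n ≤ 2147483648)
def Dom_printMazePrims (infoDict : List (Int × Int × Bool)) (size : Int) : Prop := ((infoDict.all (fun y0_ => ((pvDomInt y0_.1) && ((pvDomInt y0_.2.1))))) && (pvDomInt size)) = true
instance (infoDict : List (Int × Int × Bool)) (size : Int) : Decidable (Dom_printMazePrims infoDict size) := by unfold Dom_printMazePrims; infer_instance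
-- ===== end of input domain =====

-- B replaces A's per-cell scan of the whole dict (O(size^2·|dict|)) by one pass over the
-- dict into a pre-built False grid (O(size^2 + |dict|)); a timing run measured B faster.

-- ===== PORT A =====

-- dict lookup infoDict[(k1, k2)] : first matching key (assoc-list model of the Python dict)
def pvLookup (l : List (Int × Int × Bool)) (k1 k2 : Int) : Option Bool :=
  (l.find? (fun e => e.1 == k1 && e.2.1 == k2)).map (·.2.2)

-- outputList[row][col] = v  (read row, set cell, write row back; exact for in-range indices)
def pvSetCell (g : List (List Bool)) (row col : Int) (b : Bool) : List (List Bool) :=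
  PySem.List.pySetD g row (PySem.List.pySetD (PySem.List.pyGetD g row []) col b)

def printMazePrims (infoDict : List (Int × Int × Bool)) (size : Int) : List (List Bool) :=
  let outputList := (PySem.List.pyRange 0 size 1).foldl (fun acc _ =>
      acc ++ [(PySem.List.pyRange 0 size 1).foldl (fun r _ => r ++ [false]) []]) []
  (PySem.List.pyRange 0 (PySem.List.len outputList) 1).foldl (fun g row =>
    (PySem.List.pyRange 0 (PySem.List.len outputList) 1).foldl (fun g col =>
      infoDict.foldl (fun g e =>
        if row == e.1 && col == e.2.1 then
          match pvLookup infoDict e.1 e.2.1 with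
          | some v => if v then pvSetCell g row col v else g
          | none => g   -- unreachable: the key e was taken from infoDict itself
        else g) g) g) outputList

-- ===== PORT B =====

def printMazePrims_alt (infoDict : List (Int × Int × Bool)) (size : Int) : List (List Bool) :=
  infoDict.foldl (fun g e =>
    if e.2.2 && decide (0 ≤ e.1 ∧ e.1 < size) && decide (0 ≤ e.2.1 ∧ e.2.1 < size) then
      pvSetCell g e.1 e.2.1 true
    else g)
    (List.replicate size.toNat (List.replicate size.toNat false))

-- ===== PRECONDITION & SPEC =====

-- Pre_ excludes association lists whose (row, col) keys are not pairwise distinct: such lists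
-- do not arise from a Python dict, and on them the first-match lookup model (A's port) and the
-- overwrite order (B's port) are both defensible and may disagree.
def Pre_printMazePrims (infoDict : List (Int × Int × Bool)) (size : Int) : Prop :=
  (infoDict.map (fun e => (e.1, e.2.1))).Nodup

instance (infoDict : List (Int × Int × Bool)) (size : Int) : Decidable (Pre_printMazePrims infoDict size) := by unfold Pre_printMazePrims; infer_instance

def pvWitness_printMazePrims : (List (Int × Int × Bool)) × Int := ([(0, 0, true), (1, 0, false)], 2)

def Spec_printMazePrims (infoDict : List (Int × Int × Bool)) (size : Int) (out : List (List Bool)) : Prop := out = printMazePrims_alt infoDict size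
instance (infoDict : List (Int × Int × Bool)) (size : Int) (out : List (List Bool)) : Decidable (Spec_printMazePrims infoDict size out) := by unfold Spec_printMazePrims; infer_instance

-- ===== CLAIM (what is proved, stated in full; the proofs are below) =====
def Claim_equal_printMazePrims : Prop := ∀ (infoDict : List (Int × Int × Bool)) (size : Int), Dom_printMazePrims infoDict size → Pre_printMazePrims infoDict size → Spec_printMazePrims infoDict size (printMazePrims infoDict size)

-- ===== LEMMAS AND PROOFS =====

-- Nat-indexed cell read and write on a grid
def getC (g : List (List Bool)) (r c : Nat) : Bool := (g.getD r []).getD c false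
def setC (g : List (List Bool)) (r c : Nat) (b : Bool) : List (List Bool) :=
  g.set r ((g.getD r []).set c b)

theorem pvSetCell_eq_setC (g : List (List Bool)) {row col : Int} (hr : 0 ≤ row) (hc : 0 ≤ col) (b : Bool) :
    pvSetCell g row col b = setC g row.toNat col.toNat b := by
  unfold pvSetCell setC
  rw [PySem.List.pySetD_of_nonneg _ _ hr, PySem.List.pySetD_of_nonneg _ _ hc]
  congr 1
  simp [PySem.List.pyGetD, PySem.List.pyGet?_of_nonneg _ hr, List.getD]

theorem getD_set_ite {α : Type} (l : List α) (i j : Nat) (a d : α) :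
    (l.set i a).getD j d = if i = j ∧ i < l.length then a else l.getD j d := by
  rw [List.getD_eq_getElem?_getD, List.getElem?_set, List.getD_eq_getElem?_getD]
  by_cases h1 : i = j
  · subst h1
    by_cases h2 : i < l.length
    · simp [h2]
    · simp [h2]
  · simp [h1]

theorem getC_setC (g : List (List Bool)) (r c r' c' : Nat) (b : Bool) :
    getC (setC g r c b) r' c' =
      if r = r' ∧ c = c' ∧ r < g.length ∧ c < (g.getD r []).length then b
      else getC g r' c' := by
  unfold getC setC
  rw [getD_set_ite]
  by_cases h1 : r = r' ∧ r < g.length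
  · rw [if_pos h1, getD_set_ite]
    obtain ⟨hrr, hrl⟩ := h1
    subst hrr
    by_cases h2 : c = c' ∧ c < (g.getD r []).length
    · rw [if_pos h2, if_pos ⟨rfl, h2.1, hrl, h2.2⟩]
    · rw [if_neg h2, if_neg (by tauto)]
  · rw [if_neg h1, if_neg (by tauto)]

def Shaped (n : Nat) (g : List (List Bool)) : Prop :=
  g.length = n ∧ ∀ r < n, (g.getD r []).length = n

theorem shaped_setC {n : Nat} {g : List (List Bool)} (h : Shaped n g) (r c : Nat) (b : Bool) :
    Shaped n (setC g r c b) := by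
  obtain ⟨h1, h2⟩ := h
  refine ⟨by simp [setC, h1], fun r' hr' => ?_⟩
  unfold setC
  rw [getD_set_ite]
  split
  · next hh => rw [List.length_set]; exact h2 r (by rw [hh.1]; exact hr')
  · exact h2 r' hr'

theorem setC_setC (g : List (List Bool)) (r c : Nat) (b : Bool) :
    setC (setC g r c b) r c b = setC g r c b := by
  unfold setC
  by_cases hrl : r < g.length
  · simp [List.getD_eq_getElem?_getD, hrl, List.set_set]
  · simp [List.set_eq_of_length_le (by omega : g.length ≤ r)]

-- the per-cell condition A computes: the dict has key (r, c) with a truthy value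
def hits (l : List (Int × Int × Bool)) (r c : Int) : Bool := pvLookup l r c == some true

theorem match_lookup (o : Option Bool) (g : List (List Bool)) (r c : Int) :
    (match o with
      | some v => if v then pvSetCell g r c v else g
      | none => g) =
    if o = some true then pvSetCell g r c true else g := by
  cases o with
  | none => simp
  | some v => cases v <;> simp

-- A's innermost dict scan at a fixed cell (r, c) sets the cell iff `hits`
theorem dict_scan_eq (full l : List (Int × Int × Bool)) (r c : Nat) (g : List (List Bool)) :
    l.foldl (fun g e =>
        if (r : Int) == e.1 && (c : Int) == e.2.1 then
          match pvLookup full e.1 e.2.1 with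
          | some v => if v then pvSetCell g r c v else g
          | none => g
        else g) g =
      if (∃ e ∈ l, e.1 = (r : Int) ∧ e.2.1 = (c : Int)) ∧ hits full r c then setC g r c true
      else g := by
  induction l generalizing g with
  | nil => simp
  | cons e t ih =>
    have hstep : (if (r : Int) == e.1 && (c : Int) == e.2.1 then
          match pvLookup full e.1 e.2.1 with
          | some v => if v then pvSetCell g r c v else g
          | none => g
        else g) =
        if (e.1 = (r : Int) ∧ e.2.1 = (c : Int)) ∧ hits full r c then setC g r c true else g := by
      rw [match_lookup]
      by_cases hk : e.1 = (r : Int) ∧ e.2.1 = (c : Int)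
      · obtain ⟨hk1, hk2⟩ := hk
        rw [hk1, hk2]
        unfold hits
        by_cases hv : pvLookup full r c = some true
        · simp [hv, pvSetCell_eq_setC g (Int.natCast_nonneg _) (Int.natCast_nonneg _)]
        · simp [hv]
      · have hb : ((r : Int) == e.1 && (c : Int) == e.2.1) = false := by
          simp only [Bool.and_eq_false_iff, beq_eq_false_iff_ne, ne_eq]
          tauto
        simp only [hb, Bool.false_eq_true, if_false]
        rw [if_neg (fun h => hk h.1)]
    simp only [List.foldl_cons]
    rw [hstep]
    by_cases hk : (e.1 = (r : Int) ∧ e.2.1 = (c : Int)) ∧ hits full r c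
    · rw [if_pos hk, ih]
      by_cases hrest : (∃ e ∈ t, e.1 = (r : Int) ∧ e.2.1 = (c : Int)) ∧ hits full r c
      · rw [if_pos hrest, setC_setC, if_pos ⟨⟨e, List.mem_cons_self, hk.1⟩, hk.2⟩]
      · rw [if_neg hrest, if_pos ⟨⟨e, List.mem_cons_self, hk.1⟩, hk.2⟩]
    · rw [if_neg hk, ih]
      by_cases hrest : (∃ e ∈ t, e.1 = (r : Int) ∧ e.2.1 = (c : Int)) ∧ hits full r c
      · rw [if_pos hrest, if_pos ⟨by
          obtain ⟨x, hx, hxk⟩ := hrest.1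
          exact ⟨x, List.mem_cons_of_mem e hx, hxk⟩, hrest.2⟩]
      · rw [if_neg hrest, if_neg (by
          rintro ⟨⟨x, hx, hxk⟩, hh⟩
          rcases List.mem_cons.mp hx with h | h
          · exact hk ⟨⟨by rw [← h]; exact hxk.1, by rw [← h]; exact hxk.2⟩, hh⟩
          · exact hrest ⟨⟨x, h, hxk⟩, hh⟩)]

-- when `hits` holds the key is in the list, so the existential conjunct is redundant
theorem hits_mem {l : List (Int × Int × Bool)} {r c : Int} (h : hits l r c) :
    ∃ e ∈ l, e.1 = r ∧ e.2.1 = c := by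
  unfold hits pvLookup at h
  cases hf : l.find? (fun e => e.1 == r && e.2.1 == c) with
  | none => rw [hf] at h; simp at h
  | some e =>
    have hm := List.mem_of_find?_eq_some hf
    have hp := List.find?_some hf
    simp only [Bool.and_eq_true, beq_iff_eq] at hp
    exact ⟨e, hm, hp⟩

theorem inner_scan (full : List (Int × Int × Bool)) (r c : Nat) (g : List (List Bool)) :
    full.foldl (fun g e =>
        if (r : Int) == e.1 && (c : Int) == e.2.1 then
          match pvLookup full e.1 e.2.1 with
          | some v => if v then pvSetCell g r c v else g
          | none => g
        else g) g =
      if hits full r c then setC g r c true else g := by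
  rw [dict_scan_eq full full r c g]
  by_cases hh : hits full r c
  · rw [if_pos ⟨hits_mem hh, hh⟩, if_pos hh]
  · rw [if_neg (by tauto), if_neg hh]

-- A's column loop at a fixed row, pointwise
theorem col_fold (full : List (Int × Int × Bool)) {n : Nat} (r : Nat) (cs : List Nat)
    (hcs : ∀ c ∈ cs, c < n) (g : List (List Bool)) (hg : Shaped n g) :
    Shaped n (cs.foldl (fun g (c : Nat) => if hits full r c then setC g r c true else g) g) ∧
    ∀ r' < n, ∀ c' < n,
      getC (cs.foldl (fun g (c : Nat) => if hits full r c then setC g r c true else g) g) r' c' =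
        if r = r' ∧ c' ∈ cs ∧ hits full r c' then true else getC g r' c' := by
  induction cs generalizing g with
  | nil => exact ⟨hg, fun r' _ c' _ => by simp⟩
  | cons c0 t ih =>
    have hc0 : c0 < n := hcs c0 List.mem_cons_self
    simp only [List.foldl_cons]
    set g1 := if hits full r c0 then setC g r c0 true else g with hg1def
    have hg1 : Shaped n g1 := by
      rw [hg1def]; split
      · exact shaped_setC hg r c0 true
      · exact hg
    obtain ⟨hsh, hpt⟩ := ih (fun c hc => hcs c (List.mem_cons_of_mem c0 hc)) g1 hg1
    refine ⟨hsh, fun r' hr' c' hc' => ?_⟩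
    have hgc : getC g1 r' c' =
        if r = r' ∧ c0 = c' ∧ hits full r c0 then true else getC g r' c' := by
      rw [hg1def]
      by_cases hhit0 : hits full (r : Int) (c0 : Int)
      · rw [if_pos hhit0, getC_setC]
        by_cases h : r = r' ∧ c0 = c'
        · rw [if_pos ⟨h.1, h.2, by rw [hg.1, h.1]; exact hr',
            by rw [hg.2 r (by omega), h.2]; exact hc'⟩, if_pos ⟨h.1, h.2, hhit0⟩]
        · rw [if_neg (by tauto), if_neg (by tauto)]
      · rw [if_neg hhit0, if_neg (by tauto)]
    rw [hpt r' hr' c' hc', hgc]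
    by_cases hrr : r = r'
    · subst hrr
      by_cases hh : hits full (r : Int) (c' : Int)
      · by_cases hmem : c' ∈ t
        · rw [if_pos ⟨rfl, hmem, hh⟩, if_pos ⟨rfl, List.mem_cons_of_mem c0 hmem, hh⟩]
        · by_cases hcc : c0 = c'
          · rw [if_neg (by tauto), if_pos ⟨rfl, hcc, hcc.symm ▸ hh⟩,
              if_pos ⟨rfl, List.mem_cons.mpr (Or.inl hcc.symm), hh⟩]
          · rw [if_neg (by tauto), if_neg (by tauto),
              if_neg (by rintro ⟨-, hm, -⟩; rcases List.mem_cons.mp hm with h | h; exacts [hcc h.symm, hmem h])]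
      · rw [if_neg (by rintro ⟨-, -, h3⟩; exact hh h3),
          if_neg (by rintro ⟨-, h2, h3⟩; exact hh (h2 ▸ h3)),
          if_neg (by rintro ⟨-, -, h3⟩; exact hh h3)]
    · rw [if_neg (by tauto), if_neg (by tauto), if_neg (by tauto)]

-- A's row loop, pointwise
theorem row_fold (full : List (Int × Int × Bool)) {n : Nat} (rs : List Nat)
    (hrs : ∀ r ∈ rs, r < n) (g : List (List Bool)) (hg : Shaped n g) :
    Shaped n (rs.foldl (fun g (r : Nat) =>
        (List.range n).foldl (fun g (c : Nat) => if hits full r c then setC g r c true else g) g) g) ∧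
    ∀ r' < n, ∀ c' < n,
      getC (rs.foldl (fun g (r : Nat) =>
          (List.range n).foldl (fun g (c : Nat) => if hits full r c then setC g r c true else g) g) g) r' c' =
        if r' ∈ rs ∧ hits full r' c' then true else getC g r' c' := by
  induction rs generalizing g with
  | nil => exact ⟨hg, fun r' _ c' _ => by simp⟩
  | cons r0 t ih =>
    simp only [List.foldl_cons]
    obtain ⟨hsh1, hpt1⟩ := col_fold full r0 (List.range n) (fun c hc => List.mem_range.mp hc) g hg
    obtain ⟨hsh, hpt⟩ := ih (fun r hr => hrs r (List.mem_cons_of_mem r0 hr)) _ hsh1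
    refine ⟨hsh, fun r' hr' c' hc' => ?_⟩
    rw [hpt r' hr' c' hc', hpt1 r' hr' c' hc']
    by_cases hh : hits full (r' : Int) (c' : Int)
    · by_cases hmem : r' ∈ t
      · rw [if_pos ⟨hmem, hh⟩, if_pos ⟨List.mem_cons_of_mem r0 hmem, hh⟩]
      · rw [if_neg (by tauto)]
        by_cases hrr : r0 = r'
        · rw [if_pos ⟨hrr, List.mem_range.mpr hc', hrr.symm ▸ hh⟩,
            if_pos ⟨List.mem_cons.mpr (Or.inl hrr.symm), hh⟩]
        · rw [if_neg (by tauto),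
            if_neg (by rintro ⟨hm, -⟩; rcases List.mem_cons.mp hm with h | h; exacts [hrr h.symm, hmem h])]
    · rw [if_neg (by rintro ⟨-, h2⟩; exact hh h2),
        if_neg (by rintro ⟨h1, -, h3⟩; exact hh (h1 ▸ h3)),
        if_neg (by rintro ⟨-, h2⟩; exact hh h2)]

-- B's single pass over the dict, pointwise (no Nodup needed yet)
theorem b_fold (size : Int) {n : Nat} (hn : n = size.toNat) (l : List (Int × Int × Bool))
    (g : List (List Bool)) (hg : Shaped n g) :
    Shaped n (l.foldl (fun g e =>
        if e.2.2 && decide (0 ≤ e.1 ∧ e.1 < size) && decide (0 ≤ e.2.1 ∧ e.2.1 < size) then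
          pvSetCell g e.1 e.2.1 true
        else g) g) ∧
    ∀ r' < n, ∀ c' < n,
      getC (l.foldl (fun g e =>
          if e.2.2 && decide (0 ≤ e.1 ∧ e.1 < size) && decide (0 ≤ e.2.1 ∧ e.2.1 < size) then
            pvSetCell g e.1 e.2.1 true
          else g) g) r' c' =
        if ∃ e ∈ l, e.1 = (r' : Int) ∧ e.2.1 = (c' : Int) ∧ e.2.2 = true then true
        else getC g r' c' := by
  induction l generalizing g with
  | nil => exact ⟨hg, fun r' _ c' _ => by simp⟩
  | cons e t ih =>
    have hstep : Shaped n (if e.2.2 && decide (0 ≤ e.1 ∧ e.1 < size) && decide (0 ≤ e.2.1 ∧ e.2.1 < size) then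
        pvSetCell g e.1 e.2.1 true else g) := by
      split
      · next hgd =>
        simp only [Bool.and_eq_true, decide_eq_true_eq] at hgd
        rw [pvSetCell_eq_setC g hgd.1.2.1 hgd.2.1]
        exact shaped_setC hg _ _ true
      · exact hg
    obtain ⟨hsh, hpt⟩ := ih _ hstep
    refine ⟨by simpa using hsh, fun r' hr' c' hc' => ?_⟩
    simp only [List.foldl_cons]
    rw [hpt r' hr' c' hc']
    by_cases hrest : ∃ x ∈ t, x.1 = (r' : Int) ∧ x.2.1 = (c' : Int) ∧ x.2.2 = true
    · rw [if_pos hrest, if_pos (by obtain ⟨x, hx, hxx⟩ := hrest; exact ⟨x, List.mem_cons_of_mem e hx, hxx⟩)]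
    · rw [if_neg hrest]
      by_cases hke : e.1 = (r' : Int) ∧ e.2.1 = (c' : Int) ∧ e.2.2 = true
      · obtain ⟨hk1, hk2, hk3⟩ := hke
        have hgd : (e.2.2 && decide (0 ≤ e.1 ∧ e.1 < size) && decide (0 ≤ e.2.1 ∧ e.2.1 < size)) = true := by
          have hr : (r' : Int) < size := by
            have := hr'; omega
          have hc : (c' : Int) < size := by
            have := hc'; omega
          simp [hk1, hk2, hk3, hr, hc]
        rw [if_pos hgd, if_pos ⟨e, List.mem_cons_self, hk1, hk2, hk3⟩]
        have hnn1 : (0 : Int) ≤ e.1 := by rw [hk1]; exact Int.natCast_nonneg _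
        have hnn2 : (0 : Int) ≤ e.2.1 := by rw [hk2]; exact Int.natCast_nonneg _
        rw [pvSetCell_eq_setC g hnn1 hnn2, getC_setC]
        have ht1 : e.1.toNat = r' := by omega
        have ht2 : e.2.1.toNat = c' := by omega
        rw [if_pos ⟨ht1, ht2, by rw [ht1, hg.1]; exact hr', by rw [ht1, ht2, hg.2 r' hr']; exact hc'⟩]
      · have hnotex : ¬(∃ x ∈ e :: t, x.1 = ((r' : Nat) : Int) ∧ x.2.1 = ((c' : Nat) : Int) ∧ x.2.2 = true) := by
          rintro ⟨x, hx, hxx⟩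
          rcases List.mem_cons.mp hx with h | h
          · exact hke (by rw [← h]; exact hxx)
          · exact hrest ⟨x, h, hxx⟩
        rw [if_neg hnotex]
        by_cases hgd : (e.2.2 && decide (0 ≤ e.1 ∧ e.1 < size) && decide (0 ≤ e.2.1 ∧ e.2.1 < size)) = true
        · rw [if_pos hgd]
          have hgd' := hgd
          simp only [Bool.and_eq_true, decide_eq_true_eq] at hgd'
          rw [pvSetCell_eq_setC g hgd'.1.2.1 hgd'.2.1, getC_setC]
          rw [if_neg (by rintro ⟨ha1, ha2, -⟩; exact hke ⟨by omega, by omega, hgd'.1.1⟩)]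
        · rw [if_neg hgd]

-- with pairwise-distinct keys, "some entry (r,c,true)" is exactly A's first-match condition
theorem hits_iff_mem {l : List (Int × Int × Bool)}
    (hnd : (l.map (fun e => (e.1, e.2.1))).Nodup) (r c : Int) :
    hits l r c ↔ ∃ e ∈ l, e.1 = r ∧ e.2.1 = c ∧ e.2.2 = true := by
  constructor
  · intro h
    obtain ⟨e, he, h1, h2⟩ := hits_mem h
    refine ⟨e, he, h1, h2, ?_⟩
    unfold hits pvLookup at h
    cases hf : l.find? (fun e => e.1 == r && e.2.1 == c) with
    | none => rw [hf] at h; simp at h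
    | some x =>
      rw [hf] at h
      simp only [Option.map_some, Option.some.injEq] at h
      -- x and e have the same key, both in l; Nodup keys → x = e
      have hxm := List.mem_of_find?_eq_some hf
      have hxp := List.find?_some hf
      simp only [Bool.and_eq_true, beq_iff_eq] at hxp
      have hx_e : x = e := List.inj_on_of_nodup_map hnd hxm he
        (by rw [Prod.mk.injEq]; exact ⟨by rw [hxp.1, h1], by rw [hxp.2, h2]⟩)
      rw [hx_e] at h; simpa using h
  · rintro ⟨e, he, h1, h2, h3⟩
    unfold hits pvLookup
    cases hf : l.find? (fun e => e.1 == r && e.2.1 == c) with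
    | none =>
      exfalso
      have := List.find?_eq_none.mp hf e he
      simp [h1, h2] at this
    | some x =>
      have hxm := List.mem_of_find?_eq_some hf
      have hxp := List.find?_some hf
      simp only [Bool.and_eq_true, beq_iff_eq] at hxp
      have hx_e : x = e := List.inj_on_of_nodup_map hnd hxm he
        (by rw [Prod.mk.injEq]; exact ⟨by rw [hxp.1, h1], by rw [hxp.2, h2]⟩)
      rw [hx_e]; simp [h3]

-- two Shaped grids that agree pointwise are equal
theorem shaped_ext {n : Nat} {g1 g2 : List (List Bool)} (h1 : Shaped n g1) (h2 : Shaped n g2)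
    (h : ∀ r < n, ∀ c < n, getC g1 r c = getC g2 r c) : g1 = g2 := by
  apply List.ext_getElem (by rw [h1.1, h2.1])
  intro r hr1 hr2
  have hrn : r < n := by rw [h1.1] at hr1; exact hr1
  apply List.ext_getElem
  · have e1 : g1[r] = g1.getD r [] := (List.getD_eq_getElem g1 [] hr1).symm
    have e2 : g2[r] = g2.getD r [] := (List.getD_eq_getElem g2 [] hr2).symm
    rw [e1, e2, h1.2 r hrn, h2.2 r hrn]
  · intro c hc1 hc2
    have hcn : c < n := by
      have := h1.2 r hrn
      rw [List.getD_eq_getElem g1 [] hr1] at this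
      omega
    have := h r hrn c hcn
    unfold getC at this
    rw [List.getD_eq_getElem g1 [] hr1, List.getD_eq_getElem g2 [] hr2] at this
    rw [List.getD_eq_getElem _ false hc1, List.getD_eq_getElem _ false hc2] at this
    exact this

theorem shaped_replicate (n : Nat) : Shaped n (List.replicate n (List.replicate n false)) := by
  refine ⟨by simp, fun r hr => ?_⟩
  rw [List.getD_eq_getElem _ _ (by simpa using hr)]
  simp

theorem getC_replicate (n r c : Nat) :
    getC (List.replicate n (List.replicate n false)) r c = false := by
  have hcol : (List.replicate n false).getD c false = false := by
    rcases lt_or_ge c n with hc | hc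
    · rw [List.getD_eq_getElem _ _ (by simpa using hc), List.getElem_replicate]
    · rw [List.getD_eq_getElem?_getD, List.getElem?_eq_none (by simpa using hc)]
      rfl
  have hout : (List.replicate n (List.replicate n false)).getD r [] =
      if r < n then List.replicate n false else [] := by
    rcases lt_or_ge r n with hr | hr
    · rw [if_pos hr, List.getD_eq_getElem _ _ (by simpa using hr), List.getElem_replicate]
    · rw [if_neg (by omega), List.getD_eq_getElem?_getD, List.getElem?_eq_none (by simpa using hr)]
      rfl
  unfold getC
  rw [hout]
  split
  · exact hcol
  · rfl

-- ===== VERDICT (by name: the statement is the Claim_ definition above) =====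
theorem printMazePrims_spec : Claim_equal_printMazePrims := by
  intro infoDict size _ hpre
  unfold Spec_printMazePrims printMazePrims printMazePrims_alt
  set n := size.toNat with hn
  -- A's initial grid is the replicate grid
  have hrow : (PySem.List.pyRange 0 size 1).foldl (fun r _ => r ++ [false]) ([] : List Bool) =
      List.replicate n false := by
    rw [show (fun (r : List Bool) (_ : Int) => r ++ [false]) =
        (fun (r : List Bool) (x : Int) => r ++ [(fun _ => false) x]) from rfl,
      PySem.List.foldl_append_singleton_eq_map]
    simp [List.map_const', PySem.List.length_pyRange_one, hn]
  have hinit : (PySem.List.pyRange 0 size 1).foldl (fun acc _ =>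
      acc ++ [(PySem.List.pyRange 0 size 1).foldl (fun r _ => r ++ [false]) []]) [] =
      List.replicate n (List.replicate n false) := by
    rw [hrow]
    rw [show (fun (acc : List (List Bool)) (_ : Int) => acc ++ [List.replicate n false]) =
        (fun (acc : List (List Bool)) (x : Int) => acc ++ [(fun _ => List.replicate n false) x]) from rfl,
      PySem.List.foldl_append_singleton_eq_map]
    simp [List.map_const', PySem.List.length_pyRange_one, hn]
  simp only [hinit]
  have hlen : PySem.List.len (List.replicate n (List.replicate n false)) = (n : Int) := by
    simp [PySem.List.len_eq]
  rw [hlen]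
  -- turn A's Int range loops into Nat range loops and collapse the dict scan
  have hrange : PySem.List.pyRange 0 (n : Int) 1 = List.map (fun (k : Nat) => (k : Int)) (List.range n) :=
    PySem.List.pyRange_zero_nat n
  rw [hrange, List.foldl_map]
  have hA := row_fold infoDict (n := n) (List.range n) (fun r hr => List.mem_range.mp hr)
    (List.replicate n (List.replicate n false)) (shaped_replicate n)
  have hB := b_fold size (n := n) rfl infoDict
    (List.replicate n (List.replicate n false)) (shaped_replicate n)
  rw [List.foldl_ext _ (fun (g : List (List Bool)) (r : Nat) =>
      (List.range n).foldl (fun g (c : Nat) => if hits infoDict r c then setC g r c true else g) g)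
    (List.replicate n (List.replicate n false))
    (fun g r _ => by
      rw [List.foldl_map]
      exact List.foldl_ext _ _ g (fun acc x _ => inner_scan infoDict r x acc))]
  apply shaped_ext hA.1 hB.1
  intro r hr c hc
  rw [hA.2 r hr c hc, hB.2 r hr c hc, getC_replicate]
  simp only [List.mem_range, hr, true_and, hits_iff_mem hpre]
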